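-- pv_equiv track=rewrite | github.com/jgregoriods/rongopy | bigrams.py | add_glottal
-- ===== SOURCE A (Python) =====
-- def add_glottal(s):
--     vowels = ['a', 'e', 'i', 'o', 'u']
--     if s[0] in vowels:
--         s = "'" + s
--     for i in range(2):
--         s = s.replace('aa', "a'a").replace('ae', "a'e").\
--             replace('ai', "a'i").replace('ao', "a'o").\
--             replace('au', "a'u").\
--             replace('ea', "e'a").replace('ee', "e'e").\
--             replace('ei', "e'i").replace('eo', "e'o").\
--             replace('eu', "e'u").\
--             replace('ia', "i'a").replace('ie', "i'e").\
--             replace('ii', "i'i").replace('io', "i'o").\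
--             replace('iu', "i'u").\
--             replace('oa', "o'a").replace('oe', "o'e").\
--             replace('oi', "o'i").replace('oo', "o'o").\
--             replace('ou', "o'u").\
--             replace('ua', "u'a").replace('ue', "u'e").\
--             replace('ui', "u'i").replace('uo', "u'o").\
--             replace('uu', "u'u")
--     return s
-- ===== SOURCE B (Python) =====
-- def add_glottal(s):
--     vowels = "aeiou"
--     out = []
--     prev = None
--     for c in s:
--         if c in vowels and (prev is None or prev in vowels):
--             out.append("'")
--         out.append(c)
--         prev = c
--     return "".join(out)
-- ===== Notes on version B (the rewrite author's own statement) =====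
-- stated objective: simpler
-- what changed: Replaced the double application of 25 chained two-character str.replace calls by a single left-to-right pass that emits an apostrophe before each vowel whose predecessor is a vowel (or which starts the string).
-- outside the precondition, e.g. on add_glottal(''): A raises IndexError, B returns ''
import Mathlib
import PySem

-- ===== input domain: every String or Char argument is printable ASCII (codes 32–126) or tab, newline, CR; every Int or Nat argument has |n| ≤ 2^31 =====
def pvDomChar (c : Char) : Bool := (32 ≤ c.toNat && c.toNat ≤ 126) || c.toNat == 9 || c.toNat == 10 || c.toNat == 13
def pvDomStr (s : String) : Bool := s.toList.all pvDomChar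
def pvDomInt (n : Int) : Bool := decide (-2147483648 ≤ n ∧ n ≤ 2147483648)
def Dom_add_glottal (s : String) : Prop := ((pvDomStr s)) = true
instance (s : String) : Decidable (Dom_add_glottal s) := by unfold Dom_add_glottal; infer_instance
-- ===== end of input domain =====

-- B replaces A's two rounds of 25 chained two-character replaces by one left-to-right pass
-- that inserts an apostrophe before each vowel preceded by a vowel (or starting the string): simpler.

-- ===== PORT A =====
-- one round of A's chained replaces
def pvPassA (s : String) : String :=
  let t := PySem.Str.replace s "aa" "a'a"
  let t := PySem.Str.replace t "ae" "a'e"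
  let t := PySem.Str.replace t "ai" "a'i"
  let t := PySem.Str.replace t "ao" "a'o"
  let t := PySem.Str.replace t "au" "a'u"
  let t := PySem.Str.replace t "ea" "e'a"
  let t := PySem.Str.replace t "ee" "e'e"
  let t := PySem.Str.replace t "ei" "e'i"
  let t := PySem.Str.replace t "eo" "e'o"
  let t := PySem.Str.replace t "eu" "e'u"
  let t := PySem.Str.replace t "ia" "i'a"
  let t := PySem.Str.replace t "ie" "i'e"
  let t := PySem.Str.replace t "ii" "i'i"
  let t := PySem.Str.replace t "io" "i'o"
  let t := PySem.Str.replace t "iu" "i'u"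
  let t := PySem.Str.replace t "oa" "o'a"
  let t := PySem.Str.replace t "oe" "o'e"
  let t := PySem.Str.replace t "oi" "o'i"
  let t := PySem.Str.replace t "oo" "o'o"
  let t := PySem.Str.replace t "ou" "o'u"
  let t := PySem.Str.replace t "ua" "u'a"
  let t := PySem.Str.replace t "ue" "u'e"
  let t := PySem.Str.replace t "ui" "u'i"
  let t := PySem.Str.replace t "uo" "u'o"
  let t := PySem.Str.replace t "uu" "u'u"
  t

def add_glottal (s : String) : String :=
  let s1 :=
    match PySem.Str.pyGet? s 0 with
    | some c =>
        if c = 'a' ∨ c = 'e' ∨ c = 'i' ∨ c = 'o' ∨ c = 'u' then "'" ++ s else s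
    | none => s   -- Python raises IndexError on s[0] here; excluded by Pre_
  (PySem.List.pyRange 0 2 1).foldl (fun t _ => pvPassA t) s1

-- ===== PORT B =====
def pvVow (c : Char) : Bool := c == 'a' || c == 'e' || c == 'i' || c == 'o' || c == 'u'

def pvStep (st : List Char × Option Char) (c : Char) : List Char × Option Char :=
  (st.1 ++ (if pvVow c && (match st.2 with | none => true | some p => pvVow p)
            then ['\'', c] else [c]),
   some c)

def add_glottal_alt (s : String) : String :=
  String.ofList ((s.toList.foldl pvStep ([], none)).1)

-- ===== PRECONDITION & SPEC =====
-- Pre_ excludes only the empty string, on which A raises IndexError (s[0]); B returns "" there.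
def Pre_add_glottal (s : String) : Prop := s ≠ ""
instance (s : String) : Decidable (Pre_add_glottal s) := by unfold Pre_add_glottal; infer_instance

def pvWitness_add_glottal : String := "kaia"

def Spec_add_glottal (s : String) (out : String) : Prop := out = add_glottal_alt s
instance (s : String) (out : String) : Decidable (Spec_add_glottal s out) := by unfold Spec_add_glottal; infer_instance

-- ===== CLAIM (what is proved, stated in full; the proofs are below) =====
def Claim_equal_add_glottal : Prop := ∀ (s : String), Dom_add_glottal s → Pre_add_glottal s → Spec_add_glottal s (add_glottal s)

-- ===== LEMMAS AND PROOFS =====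

-- list-level model of one two-character replace  s.replace(xy, x'y)
def pvRepL (x y : Char) : List Char → List Char
  | [] => []
  | [a] => [a]
  | a :: b :: t =>
      if a = x ∧ b = y then a :: '\'' :: b :: pvRepL x y t
      else a :: pvRepL x y (b :: t)

-- the 25 patterns in A's order
def pvPats : List (Char × Char) :=
  [('a','a'),('a','e'),('a','i'),('a','o'),('a','u'),
   ('e','a'),('e','e'),('e','i'),('e','o'),('e','u'),
   ('i','a'),('i','e'),('i','i'),('i','o'),('i','u'),
   ('o','a'),('o','e'),('o','i'),('o','o'),('o','u'),
   ('u','a'),('u','e'),('u','i'),('u','o'),('u','u')]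

def pvPassL (l : List Char) : List Char :=
  pvPats.foldl (fun acc p => pvRepL p.1 p.2 acc) l

-- target shape: result of inserting an apostrophe at every vowel-vowel gap
def pvInsAfter : Char → List Char → List Char
  | _, [] => []
  | p, c :: t => (if pvVow c && pvVow p then ['\'', c] else [c]) ++ pvInsAfter c t

def pvInsTop : List Char → List Char
  | [] => []
  | c :: t => c :: pvInsAfter c t

-- m is l with apostrophes inserted at some vowel-vowel gaps
inductive PVIns : List Char → List Char → Prop
  | nil : PVIns [] []
  | keep (c : Char) {l m : List Char} : PVIns l m → PVIns (c :: l) (c :: m)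
  | ins (x y : Char) {l m : List Char} : pvVow x = true → pvVow y = true →
      PVIns (y :: l) m → PVIns (x :: y :: l) (x :: '\'' :: m)

def pvSep (l : List Char) : Prop :=
  ∀ x y : Char, pvVow x = true → pvVow y = true → ¬ [x, y] <:+: l

theorem PVIns_head {l m : List Char} (h : PVIns l m) : m.head? = l.head? := by
  cases h <;> rfl

theorem PVIns_refl (l : List Char) : PVIns l l := by
  induction l with
  | nil => exact PVIns.nil
  | cons c t ih => exact PVIns.keep c ih

theorem PVIns_trans {l m n : List Char} (h1 : PVIns l m) (h2 : PVIns m n) : PVIns l n := by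
  induction h1 generalizing n with
  | nil => cases h2; exact PVIns.nil
  | keep c h ih =>
      cases h2 with
      | keep _ h2' => exact PVIns.keep c (ih h2')
      | ins _ y hx hy h2' =>
          have hh := PVIns_head h
          rename_i l1 l2 m2
          cases l1 with
          | nil => simp at hh
          | cons c2 t2 =>
              have hyc : y = c2 := by simpa using hh
              subst hyc
              exact PVIns.ins c y hx hy (ih h2')
  | ins x y hx hy h ih =>
      cases h2 with
      | keep _ h2' =>
          cases h2' with
          | keep _ h2'' => exact PVIns.ins x y hx hy (ih h2'')
          | ins _ _ hvx _ _ => simp [pvVow] at hvx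
      | ins _ _ hx2 hy2 h2' => simp [pvVow] at hy2

theorem single_prefix {a : Char} {l : List Char} : [a] <+: l ↔ l.head? = some a := by
  cases l with
  | nil => simp
  | cons c t => simp [List.cons_prefix_cons, eq_comm]

-- transfer of all-vowel prefixes/infixes backwards along an insertion
theorem PVIns_transfer {l m : List Char} (h : PVIns l m) :
    ∀ w : List Char, (∀ c ∈ w, pvVow c = true) →
      (w <+: m → w <+: l) ∧ (w <:+: m → w <:+: l) := by
  induction h with
  | nil => exact fun w _ => ⟨id, id⟩
  | keep c h ih =>
      rename_i l' m'
      intro w hw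
      have hpre : w <+: c :: m' → w <+: c :: l' := by
        intro hp
        rcases List.prefix_cons_iff.mp hp with h0 | ⟨t, rfl, ht⟩
        · simp [h0]
        · exact List.cons_prefix_cons.mpr
            ⟨rfl, (ih t (fun d hd => hw d (by simp [hd]))).1 ht⟩
      refine ⟨hpre, ?_⟩
      intro hi
      rcases List.infix_cons_iff.mp hi with hp | hi'
      · exact (hpre hp).isInfix
      · exact List.infix_cons ((ih w hw).2 hi')
  | ins x y hx hy h ih =>
      rename_i l' m'
      intro w hw
      have hpre : w <+: x :: '\'' :: m' → w <+: x :: y :: l' := by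
        intro hp
        rcases List.prefix_cons_iff.mp hp with h0 | ⟨w1, rfl, hp1⟩
        · simp [h0]
        · rcases List.prefix_cons_iff.mp hp1 with h0' | ⟨w2, rfl, hp2⟩
          · subst h0'
            exact List.cons_prefix_cons.mpr ⟨rfl, List.nil_prefix⟩
          · exact absurd (hw '\'' (by simp)) (by decide)
      refine ⟨hpre, ?_⟩
      intro hi
      rcases List.infix_cons_iff.mp hi with hp | hi'
      · exact (hpre hp).isInfix
      · rcases List.infix_cons_iff.mp hi' with hp' | hi''
        · rcases List.prefix_cons_iff.mp hp' with h0 | ⟨w2, rfl, _⟩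
          · simp [h0]
          · exact absurd (hw '\'' (by simp)) (by decide)
        · exact List.infix_cons ((ih w hw).2 hi'')

theorem pvRepL_head (x y : Char) (l : List Char) : (pvRepL x y l).head? = l.head? := by
  match l with
  | [] => rfl
  | [a] => rfl
  | a :: b :: t =>
      simp only [pvRepL]
      split <;> rfl

theorem PVIns_repL {x y : Char} (hx : pvVow x = true) (hy : pvVow y = true) (l : List Char) :
    PVIns l (pvRepL x y l) := by
  fun_induction pvRepL x y l with
  | case1 => exact PVIns.nil
  | case2 a => exact PVIns.keep a PVIns.nil
  | case3 a b t hab ih =>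
      obtain ⟨rfl, rfl⟩ := hab
      exact PVIns.ins a b hx hy (PVIns.keep b ih)
  | case4 a b t hab ih => exact PVIns.keep a ih

theorem pvRepL_no_match {x y : Char} (hx : pvVow x = true) (hy : pvVow y = true)
    (hxy : x ≠ y) (l : List Char) : ¬ [x, y] <:+: pvRepL x y l := by
  have hx' : x ≠ '\'' := by rintro rfl; simp [pvVow] at hx
  have hy' : y ≠ '\'' := by rintro rfl; simp [pvVow] at hy
  fun_induction pvRepL x y l with
  | case1 => simp
  | case2 a => intro h; have := h.length_le; simp at this
  | case3 a b t hab ih =>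
      obtain ⟨rfl, rfl⟩ := hab
      intro hinf
      rcases List.infix_cons_iff.mp hinf with hp | hinf'
      · rcases List.cons_prefix_cons.mp hp with ⟨-, hp2⟩
        rw [single_prefix] at hp2
        simp at hp2
        exact hy' hp2.symm
      · rcases List.infix_cons_iff.mp hinf' with hp | hinf'' 
        · rcases List.cons_prefix_cons.mp hp with ⟨h1, -⟩
          exact hx' h1
        · rcases List.infix_cons_iff.mp hinf'' with hp | hinf3
          · rcases List.cons_prefix_cons.mp hp with ⟨h1, -⟩
            exact hxy h1
          · exact ih hinf3
  | case4 a b t hab ih =>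
      intro hinf
      rcases List.infix_cons_iff.mp hinf with hp | hinf'
      · rcases List.cons_prefix_cons.mp hp with ⟨h1, hp2⟩
        rw [single_prefix, pvRepL_head] at hp2
        simp at hp2
        exact hab ⟨h1.symm, hp2⟩
      · exact ih hinf' 

theorem pvRepL_not_prefix_xx {x : Char} (hx : pvVow x = true) (l : List Char) :
    ¬ [x, x] <+: pvRepL x x l := by
  have hx' : x ≠ '\'' := by rintro rfl; simp [pvVow] at hx
  match l with
  | [] => simp [pvRepL]
  | [a] =>
      intro h
      rcases List.cons_prefix_cons.mp h with ⟨-, h2⟩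
      rw [single_prefix] at h2
      simp at h2
  | a :: b :: t =>
      intro h
      rw [pvRepL] at h
      split_ifs at h with hab
      · rcases List.cons_prefix_cons.mp h with ⟨-, h2⟩
        rw [single_prefix] at h2
        simp at h2
        exact hx' h2.symm
      · rcases List.cons_prefix_cons.mp h with ⟨h1, h2⟩
        rw [single_prefix, pvRepL_head] at h2
        simp at h2
        exact hab ⟨h1.symm, h2⟩

theorem pvRepL_no_xxx {x : Char} (hx : pvVow x = true) (l : List Char) :
    ¬ [x, x, x] <:+: pvRepL x x l := by
  have hx' : x ≠ '\'' := by rintro rfl; simp [pvVow] at hx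
  fun_induction pvRepL x x l with
  | case1 => simp
  | case2 a => intro h; have := h.length_le; simp at this
  | case3 a b t hab ih =>
      obtain ⟨rfl, rfl⟩ := hab
      intro hinf
      rcases List.infix_cons_iff.mp hinf with hp | hinf'
      · rcases List.cons_prefix_cons.mp hp with ⟨-, hp2⟩
        rcases List.cons_prefix_cons.mp hp2 with ⟨h1, -⟩
        exact hx' h1
      · rcases List.infix_cons_iff.mp hinf' with hp | hinf''
        · rcases List.cons_prefix_cons.mp hp with ⟨h1, -⟩
          exact hx' h1
        · rcases List.infix_cons_iff.mp hinf'' with hp | hinf3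
          · rcases List.cons_prefix_cons.mp hp with ⟨-, hp2⟩
            exact pvRepL_not_prefix_xx hx t hp2
          · exact ih hinf3
  | case4 a b t hab ih =>
      intro hinf
      rcases List.infix_cons_iff.mp hinf with hp | hinf'
      · rcases List.cons_prefix_cons.mp hp with ⟨-, hp2⟩
        exact pvRepL_not_prefix_xx hx (b :: t) hp2
      · exact ih hinf' 

theorem pvRepL_no_xx {x : Char} (hx : pvVow x = true) (l : List Char)
    (h : ¬ [x, x, x] <:+: l) : ¬ [x, x] <:+: pvRepL x x l := by
  have hx' : x ≠ '\'' := by rintro rfl; simp [pvVow] at hx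
  fun_induction pvRepL x x l with
  | case1 => simp
  | case2 a => intro hh; have := hh.length_le; simp at this
  | case3 a b t hab ih =>
      obtain ⟨ha, hb⟩ := hab
      rw [ha, hb] at h ⊢
      have hih : ¬ [x, x, x] <:+: t := fun hh => h (List.infix_cons (List.infix_cons hh))
      have hth : t.head? ≠ some x := by
        intro hh
        cases t with
        | nil => simp at hh
        | cons c t' =>
            simp at hh
            subst hh
            exact h ⟨[], t', by simp⟩
      intro hinf
      rcases List.infix_cons_iff.mp hinf with hp | hinf'
      · rcases List.cons_prefix_cons.mp hp with ⟨-, hp2⟩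
        rw [single_prefix] at hp2
        simp at hp2
        exact hx' hp2.symm
      · rcases List.infix_cons_iff.mp hinf' with hp | hinf''
        · rcases List.cons_prefix_cons.mp hp with ⟨h1, -⟩
          exact hx' h1
        · rcases List.infix_cons_iff.mp hinf'' with hp | hinf3
          · rcases List.cons_prefix_cons.mp hp with ⟨-, hp2⟩
            rw [single_prefix, pvRepL_head] at hp2
            exact hth hp2
          · exact ih hih hinf3
  | case4 a b t hab ih =>
      have hmono : ¬ [x, x, x] <:+: (b :: t) := fun hh => h (List.infix_cons hh)
      intro hinf
      rcases List.infix_cons_iff.mp hinf with hp | hinf'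
      · rcases List.cons_prefix_cons.mp hp with ⟨h1, hp2⟩
        rw [single_prefix, pvRepL_head] at hp2
        simp at hp2
        exact hab ⟨h1.symm, hp2⟩
      · exact ih hmono hinf' 

theorem PVIns_foldl (ps : List (Char × Char))
    (hps : ∀ p ∈ ps, pvVow p.1 = true ∧ pvVow p.2 = true) (l : List Char) :
    PVIns l (ps.foldl (fun acc p => pvRepL p.1 p.2 acc) l) := by
  induction ps generalizing l with
  | nil => exact PVIns_refl l
  | cons p ps ih =>
      rw [List.foldl_cons]
      exact PVIns_trans (PVIns_repL (hps p (by simp)).1 (hps p (by simp)).2 l)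
        (ih (fun q hq => hps q (by simp [hq])) _)

theorem noInfix_foldl (w : List Char) (hw : ∀ c ∈ w, pvVow c = true)
    (ps : List (Char × Char)) (hps : ∀ p ∈ ps, pvVow p.1 = true ∧ pvVow p.2 = true)
    {l : List Char} (h : ¬ w <:+: l) :
    ¬ w <:+: ps.foldl (fun acc p => pvRepL p.1 p.2 acc) l := by
  induction ps generalizing l with
  | nil => exact h
  | cons p ps ih =>
      rw [List.foldl_cons]
      refine ih (fun q hq => hps q (by simp [hq])) ?_
      intro hinf
      exact h ((PVIns_transfer (PVIns_repL (hps p (by simp)).1 (hps p (by simp)).2 l) w hw).2 hinf)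

theorem vow_cases {c : Char} (h : pvVow c = true) :
    c = 'a' ∨ c = 'e' ∨ c = 'i' ∨ c = 'o' ∨ c = 'u' := by
  simp [pvVow] at h
  tauto

theorem mem_pvPats {x y : Char} (hx : pvVow x = true) (hy : pvVow y = true) :
    (x, y) ∈ pvPats := by
  rcases vow_cases hx with rfl | rfl | rfl | rfl | rfl <;>
    rcases vow_cases hy with rfl | rfl | rfl | rfl | rfl <;> decide

theorem pvPats_vowels : ∀ p ∈ pvPats, pvVow p.1 = true ∧ pvVow p.2 = true := by decide

theorem sep_double (l : List Char) : pvSep (pvPassL (pvPassL l)) := by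
  intro x y hx hy
  obtain ⟨p1, p2, hsplit⟩ := List.append_of_mem (mem_pvPats hx hy)
  have hp1 : ∀ p ∈ p1, pvVow p.1 = true ∧ pvVow p.2 = true := fun p hp =>
    pvPats_vowels p (by rw [hsplit]; simp [hp])
  have hp2 : ∀ p ∈ p2, pvVow p.1 = true ∧ pvVow p.2 = true := fun p hp =>
    pvPats_vowels p (by rw [hsplit]; simp [hp])
  have hfold : ∀ g : List Char, pvPassL g =
      p2.foldl (fun acc p => pvRepL p.1 p.2 acc)
        (pvRepL x y (p1.foldl (fun acc p => pvRepL p.1 p.2 acc) g)) := by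
    intro g
    rw [pvPassL, hsplit, List.foldl_append, List.foldl_cons]
  have hwxy : ∀ c ∈ [x, y], pvVow c = true := by
    intro c hc; rcases (by simpa using hc : c = x ∨ c = y) with rfl | rfl
    · exact hx
    · exact hy
  by_cases hxy : x = y
  · subst hxy
    have hwxxx : ∀ c ∈ [x, x, x], pvVow c = true := by
      intro c hc
      rcases (by simpa using hc : c = x) with rfl
      exact hx
    have hg : ¬ [x, x, x] <:+: pvPassL l := by
      rw [hfold l]
      exact noInfix_foldl _ hwxxx p2 hp2 (pvRepL_no_xxx hx _)
    rw [hfold (pvPassL l)]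
    refine noInfix_foldl [x, x] hwxy p2 hp2 ?_
    refine pvRepL_no_xx hx _ ?_
    exact noInfix_foldl [x, x, x] hwxxx p1 hp1 hg
  · rw [hfold (pvPassL l)]
    exact noInfix_foldl [x, y] hwxy p2 hp2 (pvRepL_no_match hx hy hxy _)

theorem PVIns_sep_eq {l m : List Char} (h : PVIns l m) (hs : pvSep m) : m = pvInsTop l := by
  induction h with
  | nil => rfl
  | keep c h ih =>
      rename_i l' m'
      have hsm : pvSep m' := fun a b ha hb hmem => hs a b ha hb (List.infix_cons hmem)
      cases l' with
      | nil => cases h; rfl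
      | cons y t =>
          have hh := PVIns_head h
          have hm' := ih hsm
          by_cases hv : pvVow c = true ∧ pvVow y = true
          · exfalso
            refine hs c y hv.1 hv.2 ?_
            rw [hm']
            have hpfx : [c, y] <+: c :: pvInsTop (y :: t) := by
              simp [pvInsTop, List.cons_prefix_cons]
            exact hpfx.isInfix
          · have hcond : (pvVow y && pvVow c) = false := by
              cases hcy : pvVow y <;> cases hcc : pvVow c <;> simp_all
            rw [hm']
            simp [pvInsTop, pvInsAfter, hcond]
  | ins x y hx hy h ih =>
      have hsm' : pvSep _ := fun a b ha hb hmem =>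
        hs a b ha hb (List.infix_cons (List.infix_cons hmem))
      have hm' := ih hsm'
      rw [hm']
      simp [pvInsTop, pvInsAfter, hx, hy]

theorem foldl_step_some (t : List Char) : ∀ (acc : List Char) (p : Char),
    (t.foldl pvStep (acc, some p)).1 = acc ++ pvInsAfter p t := by
  induction t with
  | nil => intro acc p; simp [pvInsAfter]
  | cons c t ih =>
      intro acc p
      simp only [List.foldl_cons, pvStep, pvInsAfter]
      rw [ih]
      simp

theorem go_spec (x y : Char) : ∀ (fuel : Nat) (l acc : List Char), l.length ≤ fuel →
    PySem.Chars.replace.go [x, y] [x, '\'', y] fuel l acc = acc.reverse ++ pvRepL x y l := by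
  intro fuel
  induction fuel with
  | zero =>
      intro l acc hl
      have : l = [] := List.eq_nil_of_length_eq_zero (Nat.le_zero.mp hl)
      subst this
      simp [PySem.Chars.replace.go, pvRepL]
  | succ fuel ih =>
      intro l acc hl
      match l with
      | [] => simp [PySem.Chars.replace.go, pvRepL]
      | [c] =>
          rw [PySem.Chars.replace.go]
          simp only [List.isPrefixOf, Bool.and_false, Bool.false_eq_true, if_false]
          rw [ih [] _ (by simp)]
          simp [pvRepL]
      | c :: b :: t =>
          rw [PySem.Chars.replace.go]
          by_cases hcb : x = c ∧ y = b
          · obtain ⟨rfl, rfl⟩ := hcb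
            simp only [List.isPrefixOf, BEq.rfl, Bool.and_true, if_true, List.length_cons,
              List.drop_succ_cons, List.drop_zero, List.length_nil]
            rw [ih t _ (by simp at hl ⊢; omega)]
            simp [pvRepL]
          · have hpf : [x, y].isPrefixOf (c :: b :: t) = false := by
              simp [List.isPrefixOf]
              intro h1 h2
              exact absurd ⟨h1, h2⟩ hcb
            rw [hpf]
            simp only [Bool.false_eq_true, if_false]
            rw [ih (b :: t) _ (by simp at hl ⊢; omega)]
            simp [pvRepL]
            intro h1 h2
            exact absurd ⟨h1.symm, h2.symm⟩ hcb

theorem chars_replace_pair (x y : Char) (l : List Char) :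
    PySem.Chars.replace l [x, y] [x, '\'', y] = pvRepL x y l := by
  unfold PySem.Chars.replace
  simp
  exact go_spec x y l.length l [] le_rfl

set_option maxRecDepth 40000 in
theorem passA_toList (s : String) : (pvPassA s).toList = pvPassL s.toList := by
  simp [pvPassA, pvPassL, pvPats, PySem.Str.toList_replace, chars_replace_pair,
    List.foldl_cons, List.foldl_nil]

theorem main_str (s : String) (hne : s ≠ "") : add_glottal s = add_glottal_alt s := by
  obtain ⟨c, t, hl⟩ : ∃ c t, s.toList = c :: t := by
    cases hl : s.toList with
    | nil =>
        exfalso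
        have h0 := String.ofList_toList (s := s)
        rw [hl] at h0
        exact hne h0.symm
    | cons c t => exact ⟨c, t, rfl⟩
  have hget : PySem.Str.pyGet? s 0 = some c := by
    have h0 := PySem.Str.pyGet?_natCast s 0
    rw [hl] at h0
    simpa using h0
  have hvowiff : (c = 'a' ∨ c = 'e' ∨ c = 'i' ∨ c = 'o' ∨ c = 'u') ↔ pvVow c = true := by
    simp [pvVow]
    tauto
  have hq : pvVow '\'' = false := by decide
  have hpass : ∀ g : List Char, PVIns g (pvPassL g) := by
    intro g
    rw [pvPassL]
    exact PVIns_foldl pvPats pvPats_vowels g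
  have hA : (add_glottal s).toList =
      pvPassL (pvPassL (if pvVow c then '\'' :: c :: t else c :: t)) := by
    rw [add_glottal]
    simp only [hget]
    rw [show PySem.List.pyRange 0 2 1 = [0, 1] from rfl]
    simp only [List.foldl_cons, List.foldl_nil]
    rw [passA_toList, passA_toList]
    by_cases hv : pvVow c = true
    · rw [if_pos (hvowiff.mpr hv), if_pos hv]
      have hcat : ("'" ++ s).toList = '\'' :: c :: t := by simp [hl]
      rw [hcat]
    · rw [if_neg (fun hh => hv (hvowiff.mp hh)), if_neg hv, hl]
  have hAeq : pvPassL (pvPassL (if pvVow c then '\'' :: c :: t else c :: t)) =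
      pvInsTop (if pvVow c then '\'' :: c :: t else c :: t) :=
    PVIns_sep_eq (PVIns_trans (hpass _) (hpass _)) (sep_double _)
  have hB : (add_glottal_alt s).toList =
      (if pvVow c then ['\'', c] else [c]) ++ pvInsAfter c t := by
    rw [add_glottal_alt]
    rw [String.toList_ofList, hl, List.foldl_cons]
    have hstep : pvStep ([], none) c = ((if pvVow c then ['\'', c] else [c]), some c) := by
      simp [pvStep]
    rw [hstep]
    cases t with
    | nil => simp [pvInsAfter]
    | cons d t' => rw [foldl_step_some]
  have hfinal : (add_glottal s).toList = (add_glottal_alt s).toList := by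
    rw [hA, hB, hAeq]
    by_cases hv : pvVow c = true
    · simp [hv, pvInsTop, pvInsAfter, hq]
    · have hv' : pvVow c = false := by simpa using hv
      simp [hv', pvInsTop]
  calc add_glottal s = String.ofList (add_glottal s).toList := String.ofList_toList.symm
    _ = String.ofList (add_glottal_alt s).toList := by rw [hfinal]
    _ = add_glottal_alt s := String.ofList_toList

-- ===== VERDICT (by name: the statement is the Claim_ definition above) =====
set_option maxRecDepth 4000 in
theorem add_glottal_spec : Claim_equal_add_glottal := by
  intro s _ hpre
  exact main_str s hpre
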